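-- pv_equiv track=rewrite | github.com/alicia-li-auckland/toys | scripts/xer_trade_map.py | find_task_records
-- ===== SOURCE A (Python) =====
-- def find_task_records(xer_text):
--     lines = xer_text.splitlines()
--     in_task_table = False
--     fields = []
--     records = []
--
--     for line in lines:
--         if line.startswith('%T'):
--             table = line[2:].strip().split('\t', 1)[-1].strip().upper()
--             if in_task_table and table != 'TASK':
--                 # End of TASK table
--                 break
--             in_task_table = table == 'TASK'
--             fields = []
--             continue
--
--         if not in_task_table:
--             continue
--
--         if line.startswith('%F'):
--             fields = line[2:].strip().split('\t')
--             continue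
--
--         if line.startswith('%R') and fields:
--             values = line[2:].split('\t')
--             if len(values) < len(fields):
--                 values += [''] * (len(fields) - len(values))
--             records.append(dict(zip(fields, values)))
--
--     return fields, records
-- ===== SOURCE B (Python) =====
-- def find_task_records(xer_text):
--     # Partition lines into %T-headed blocks, take the first contiguous run of
--     # TASK blocks, then parse each block's %F/%R lines.
--     lines = xer_text.splitlines()
--     blocks = []
--     name = None
--     body = []
--     for line in lines:
--         if line.startswith('%T'):
--             if name is not None:
--                 blocks.append((name, body))
--             name = line[2:].strip().split('\t', 1)[-1].strip().upper()
--             body = []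
--         elif name is not None:
--             body.append(line)
--     if name is not None:
--         blocks.append((name, body))
--
--     run = []
--     seen = False
--     for nm, bd in blocks:
--         if nm == 'TASK':
--             seen = True
--             run.append(bd)
--         elif seen:
--             break
--
--     fields = []
--     records = []
--     for bd in run:
--         fields = []
--         for line in bd:
--             if line.startswith('%F'):
--                 fields = line[2:].strip().split('\t')
--             elif line.startswith('%R') and fields:
--                 values = line[2:].split('\t')
--                 values += [''] * (len(fields) - len(values))
--                 records.append(dict(zip(fields, values)))
--     return fields, records
-- ===== Notes on version B (the rewrite author's own statement) =====
-- stated objective: alternative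
-- what changed: A's single-pass boolean state machine over the lines is replaced by a three-phase pipeline: partition the lines into %T-headed blocks, select the first contiguous run of TASK blocks, then fold each block's %F/%R lines into (fields, records).
import Mathlib
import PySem

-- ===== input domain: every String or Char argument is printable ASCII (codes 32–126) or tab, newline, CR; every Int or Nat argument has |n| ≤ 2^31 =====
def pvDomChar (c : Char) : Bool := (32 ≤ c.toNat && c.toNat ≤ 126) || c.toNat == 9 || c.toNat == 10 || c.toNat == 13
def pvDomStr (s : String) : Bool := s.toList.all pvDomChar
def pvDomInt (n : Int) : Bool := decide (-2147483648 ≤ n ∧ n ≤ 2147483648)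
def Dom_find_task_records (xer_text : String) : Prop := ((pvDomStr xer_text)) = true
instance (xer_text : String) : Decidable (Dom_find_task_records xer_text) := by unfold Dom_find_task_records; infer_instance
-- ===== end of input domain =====

-- B re-decomposes A's one-pass state machine into explicit phases (split into %T blocks,
-- take the first contiguous TASK run, parse each block); objective: alternative decomposition.

-- ===== PORT A =====
-- helpers for expressions that appear verbatim in both Source A and Source B:
-- line.startswith(tag)
def pvStarts (line tag : String) : Bool := PySem.Str.startswith line tag

-- line[2:].strip().split('\t', 1)[-1].strip().upper()
-- (split with a nonempty separator never returns none/[], so the getD defaults never fire)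
def pvHeader (line : String) : String :=
  PySem.Str.upper (PySem.Str.strip (PySem.List.pyGetD
    ((PySem.Str.splitMax? (PySem.Str.strip (PySem.Str.slice line (some 2) none)) "\t" 1).getD [])
    (-1) ""))

-- line[2:].strip().split('\t')
def pvFields (line : String) : List String :=
  (PySem.Str.split? (PySem.Str.strip (PySem.Str.slice line (some 2) none)) "\t").getD []

-- values = line[2:].split('\t'); pad with '' to len(fields); dict(zip(fields, values))
def pvRecord (fields : List String) (line : String) : List (String × String) :=
  let values := (PySem.Str.split? (PySem.Str.slice line (some 2) none) "\t").getD []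
  let values := values ++ List.replicate (fields.length - values.length) ""
  (PySem.Dict.ofList (fields.zip values)).items

-- A's for-loop over the lines; the early `break` returns the current state
def aLoop : List String → Bool → List String → List (List (String × String)) →
    List String × List (List (String × String))
  | [], _, fields, records => (fields, records)
  | line :: rest, inTask, fields, records =>
    if pvStarts line "%T" then
      let table := pvHeader line
      if inTask && table != "TASK" then (fields, records)   -- break
      else aLoop rest (table == "TASK") [] records
    else if !inTask then
      aLoop rest inTask fields records
    else if pvStarts line "%F" then
      aLoop rest inTask (pvFields line) records
    else if pvStarts line "%R" && !fields.isEmpty then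
      aLoop rest inTask fields (records ++ [pvRecord fields line])
    else
      aLoop rest inTask fields records

def find_task_records (xer_text : String) : List String × (List (List (String × String))) :=
  aLoop (PySem.Str.splitlines xer_text) false [] []

-- ===== PORT B =====
-- phase 1: partition the lines into %T-headed blocks (name, body)
def bSplit : List String → List (String × List String) → Option String → List String →
    List (String × List String)
  | [], blocks, name?, body =>
    (match name? with
     | none => blocks
     | some n => blocks ++ [(n, body)])
  | line :: rest, blocks, name?, body =>
    if pvStarts line "%T" then
      let blocks' := match name? with
        | none => blocks
        | some n => blocks ++ [(n, body)]
      bSplit rest blocks' (some (pvHeader line)) []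
    else
      match name? with
      | none => bSplit rest blocks none body
      | some n => bSplit rest blocks (some n) (body ++ [line])

-- phase 2: the first contiguous run of TASK blocks
def bRun : List (String × List String) → List (List String) → Bool → List (List String)
  | [], run, _ => run
  | (nm, bd) :: rest, run, seen =>
    if nm == "TASK" then bRun rest (run ++ [bd]) true
    else if seen then run
    else bRun rest run seen

-- phase 3: parse one body line into the (fields, records) state
def bStep (st : List String × List (List (String × String))) (line : String) :
    List String × List (List (String × String)) :=
  if pvStarts line "%F" then (pvFields line, st.2)
  else if pvStarts line "%R" && !st.1.isEmpty then
    (st.1, st.2 ++ [pvRecord st.1 line])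
  else st

def bFinish (run : List (List String)) (records : List (List (String × String))) :
    List String × List (List (String × String)) :=
  run.foldl (fun st bd => bd.foldl bStep ([], st.2)) ([], records)

def find_task_records_alt (xer_text : String) : List String × (List (List (String × String))) :=
  bFinish (bRun (bSplit (PySem.Str.splitlines xer_text) [] none []) [] false) []

-- ===== PRECONDITION & SPEC =====
def Spec_find_task_records (xer_text : String) (out : List String × (List (List (String × String)))) : Prop := out = find_task_records_alt xer_text
instance (xer_text : String) (out : List String × (List (List (String × String)))) : Decidable (Spec_find_task_records xer_text out) := by unfold Spec_find_task_records; infer_instance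

-- ===== CLAIM (what is proved, stated in full; the proofs are below) =====
def Claim_equal_find_task_records : Prop := ∀ (xer_text : String), Dom_find_task_records xer_text → Spec_find_task_records xer_text (find_task_records xer_text)

-- ===== LEMMAS AND PROOFS =====

-- A's loop once it is inside the TASK table, as a function of the remaining lines
-- and the current (fields, records) state
def pvG : List String → List String × List (List (String × String)) →
    List String × List (List (String × String))
  | [], st => st
  | line :: rest, st =>
    if pvStarts line "%T" then
      if pvHeader line == "TASK" then pvG rest ([], st.2) else st
    else pvG rest (bStep st line)

theorem aLoop_task (lines : List String) :
    ∀ fields records, aLoop lines true fields records = pvG lines (fields, records) := by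
  induction lines with
  | nil => intro fields records; rfl
  | cons line rest ih =>
    intro fields records
    by_cases hT : pvStarts line "%T" = true
    · by_cases hh : pvHeader line = "TASK" <;>
        simp [aLoop, pvG, hT, hh, ih]
    · by_cases hF : pvStarts line "%F" = true
      · simp [aLoop, pvG, bStep, hT, hF, ih]
      · by_cases hR : pvStarts line "%R" = true
        · by_cases hE : fields = [] <;>
            simp [aLoop, pvG, bStep, hT, hF, hR, hE, ih]
        · simp [aLoop, pvG, bStep, hT, hF, hR, ih]

theorem bSplit_acc (lines : List String) :
    ∀ blocks name? body,
      bSplit lines blocks name? body = blocks ++ bSplit lines [] name? body := by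
  induction lines with
  | nil => intro blocks name? body; cases name? <;> simp [bSplit]
  | cons line rest ih =>
    intro blocks name? body
    by_cases hT : pvStarts line "%T" = true
    · cases name? with
      | none =>
        simp only [bSplit, hT, if_pos]
        rw [ih blocks]
      | some n =>
        simp only [bSplit, hT, if_pos]
        rw [ih (blocks ++ [(n, body)]), ih ([] ++ [(n, body)])]
        simp
    · cases name? with
      | none => simp only [bSplit, hT, Bool.false_eq_true, if_neg, not_false_iff]
                exact ih ..
      | some n => simp only [bSplit, hT, Bool.false_eq_true, if_neg, not_false_iff]
                  exact ih ..

theorem bRun_acc (blocks : List (String × List String)) :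
    ∀ run seen, bRun blocks run seen = run ++ bRun blocks [] seen := by
  induction blocks with
  | nil => intro run seen; simp [bRun]
  | cons b rest ih =>
    intro run seen
    obtain ⟨nm, bd⟩ := b
    by_cases h : nm = "TASK"
    · simp only [bRun, h, beq_self_eq_true, if_pos, List.nil_append]
      rw [ih (run ++ [bd]), ih [bd]]
      simp
    · by_cases hs : seen = true
      · simp [bRun, h, hs]
      · simp only [bRun, h]
        simp only [beq_iff_eq, h, if_false, hs, Bool.false_eq_true, if_neg, not_false_iff]
        exact ih ..

theorem bSplit_head (lines : List String) :
    ∀ h body, ∃ bd rest', bSplit lines [] (some h) body = (h, bd) :: rest' := by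
  induction lines with
  | nil => intro h body; exact ⟨body, [], rfl⟩
  | cons line rest ih =>
    intro h body
    by_cases hT : pvStarts line "%T" = true
    · refine ⟨body, bSplit rest [] (some (pvHeader line)) [], ?_⟩
      simp only [bSplit, hT, if_pos]
      rw [bSplit_acc]
      simp
    · obtain ⟨bd, rest', hs⟩ := ih h (body ++ [line])
      refine ⟨bd, rest', ?_⟩
      simp only [bSplit, hT, Bool.false_eq_true, if_neg, not_false_iff]
      exact hs

theorem bFinish_from (R : List (List String)) (s : List String × List (List (String × String)))
    (hR : R ≠ []) :
    R.foldl (fun st bd => bd.foldl bStep ([], st.2)) s = bFinish R s.2 := by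
  cases R with
  | nil => exact absurd rfl hR
  | cons bd R' => simp [bFinish]

theorem bKey (lines : List String) :
    ∀ body records seen,
      bFinish (bRun (bSplit lines [] (some "TASK") body) [] seen) records
        = pvG lines (body.foldl bStep ([], records)) := by
  induction lines with
  | nil =>
    intro body records seen
    simp [bSplit, bRun, bFinish, pvG]
  | cons line rest ih =>
    intro body records seen
    by_cases hT : pvStarts line "%T" = true
    · simp only [bSplit, hT, if_pos]
      rw [bSplit_acc]
      by_cases hh : pvHeader line = "TASK"
      · -- another TASK block follows: its body joins the run, fields reset
        rw [hh]
        have hR : bRun (bSplit rest [] (some "TASK") []) [] true ≠ [] := by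
          obtain ⟨bd, rest', hs⟩ := bSplit_head rest "TASK" []
          rw [hs]
          simp only [bRun, beq_self_eq_true, if_true, List.nil_append]
          rw [bRun_acc]
          simp
        simp only [List.nil_append, List.singleton_append, bRun, beq_self_eq_true, if_true]
        rw [bRun_acc]
        simp only [List.nil_append, List.singleton_append]
        unfold bFinish
        rw [List.foldl_cons, bFinish_from _ _ hR]
        rw [ih [] ((body.foldl bStep ([], records)).2) true]
        simp [pvG, hT, hh, List.foldl_nil]
      · -- a non-TASK block ends the run right here
        obtain ⟨bd, rest', hs⟩ := bSplit_head rest (pvHeader line) []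
        have hne : (pvHeader line == "TASK") = false := by simp [hh]
        simp only [List.singleton_append, bRun, beq_self_eq_true, if_pos, List.nil_append,
          hs, hne, Bool.false_eq_true, if_false]
        simp [bFinish, pvG, hT, hh]
    · simp only [bSplit, hT, Bool.false_eq_true, if_neg, not_false_iff]
      rw [ih (body ++ [line]) records seen]
      simp [pvG, hT, List.foldl_append]

theorem bPre (lines : List String) :
    ∀ records,
      (bFinish (bRun (bSplit lines [] none []) [] false) records
          = aLoop lines false [] records)
      ∧ ∀ h body, h ≠ "TASK" →
          bFinish (bRun (bSplit lines [] (some h) body) [] false) records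
            = aLoop lines false [] records := by
  induction lines with
  | nil =>
    intro records
    constructor
    · simp [bSplit, bRun, bFinish, aLoop]
    · intro h body hne
      have hb : (h == "TASK") = false := by simp [hne]
      simp [bSplit, bRun, hb, bFinish, aLoop]
  | cons line rest ih =>
    intro records
    constructor
    · by_cases hT : pvStarts line "%T" = true
      · simp only [bSplit, hT, if_pos]
        by_cases hh : pvHeader line = "TASK"
        · rw [hh, bKey rest [] records false]
          simp [aLoop, hT, hh, aLoop_task, List.foldl_nil]
        · rw [(ih records).2 (pvHeader line) [] hh]
          have hb' : (pvHeader line == "TASK") = false := by simp [hh]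
          simp [aLoop, hT, hb']
      · simp only [bSplit, hT, Bool.false_eq_true, if_neg, not_false_iff]
        rw [(ih records).1]
        simp [aLoop, hT]
    · intro h body hne
      have hb : (h == "TASK") = false := by simp [hne]
      by_cases hT : pvStarts line "%T" = true
      · simp only [bSplit, hT, if_pos]
        rw [bSplit_acc]
        simp only [List.nil_append, List.singleton_append]
        have hdrop : bRun ((h, body) :: bSplit rest [] (some (pvHeader line)) []) [] false
            = bRun (bSplit rest [] (some (pvHeader line)) []) [] false := by
          simp [bRun, hb]
        rw [hdrop]
        by_cases hh : pvHeader line = "TASK"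
        · rw [hh, bKey rest [] records false]
          simp [aLoop, hT, hh, aLoop_task, List.foldl_nil]
        · rw [(ih records).2 (pvHeader line) [] hh]
          have hb' : (pvHeader line == "TASK") = false := by simp [hh]
          simp [aLoop, hT, hb']
      · simp only [bSplit, hT, Bool.false_eq_true, if_neg, not_false_iff]
        rw [(ih records).2 h (body ++ [line]) hne]
        simp [aLoop, hT]

-- ===== VERDICT (by name: the statement is the Claim_ definition above) =====
theorem find_task_records_spec : Claim_equal_find_task_records := by
  intro x _
  unfold Spec_find_task_records find_task_records find_task_records_alt
  exact ((bPre (PySem.Str.splitlines x) []).1).symm
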